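-- pv_equiv track=rewrite | github.com/prskid1000/telecode | bot/live.py | find_overlap_end
-- ===== SOURCE A (Python) =====
-- _MIN_OVERLAP = 8  # minimum non-ws chars to count as genuine overlap
--
-- def _z_array(s: str) -> list[int]:
--     """Classic Z-algorithm: ``z[i]`` = longest substring starting at ``i`` that
--     matches a prefix of ``s``. ``O(len(s))`` time and space.
--     """
--     n = len(s)
--     z = [0] * n
--     if n == 0:
--         return z
--     z[0] = n
--     l = r = 0
--     for i in range(1, n):
--         if i < r:
--             z[i] = min(r - i, z[i - l])
--         while i + z[i] < n and s[z[i]] == s[i + z[i]]: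
--             z[i] += 1
--         if i + z[i] > r:
--             l, r = i, i + z[i]
--     return z
--
-- def find_overlap_end(existing: str, new: str) -> int:
--     """Return the index into ``new`` where genuinely-new content begins.
--
--     Whitespace-insensitive: both strings are compared on their non-whitespace
--     projections (so TUI padding/reflow doesn't block an overlap match). Uses
--     Z-algorithm on ``new_chars + '\\x01' + existing_tail`` so the total cost is
--     linear in the combined length.
--     """
--     if not existing or not new:
--         return 0
--
--     # Only look at the tail of existing that could plausibly overlap.
--     tail = existing[-(len(new) * 3) :] if len(existing) > len(new) * 3 else existing
--     ex_chars = [c for c in tail if not c.isspace()]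
--     nw = [(i, c) for i, c in enumerate(new) if not c.isspace()]
--
--     if not ex_chars or not nw:
--         return 0
--
--     ex_proj = "".join(ex_chars)
--     nw_proj = "".join(c for _, c in nw)
--
--     # Sentinel guaranteed not to appear in either projection.
--     combined = nw_proj + "\x01" + ex_proj
--     z = _z_array(combined)
--     off = len(nw_proj) + 1  # index where ex_proj starts inside combined
--
--     # Walk ex_proj start positions; the earliest full suffix match wins.
--     len_ex = len(ex_proj)
--     min_start = max(0, len_ex - len(nw_proj))
--     for start in range(min_start, len_ex - _MIN_OVERLAP + 1):
--         remaining = len_ex - start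
--         if z[off + start] >= remaining and remaining >= _MIN_OVERLAP:
--             # We matched the last ``remaining`` chars of ex against the first
--             # ``remaining`` chars of nw → skip that many tokens in new.
--             return nw[remaining - 1][0] + 1
--     return 0
-- ===== SOURCE B (Python) =====
-- _MIN_OVERLAP = 8  # minimum non-ws chars to count as genuine overlap
--
-- def find_overlap_end(existing: str, new: str) -> int:
--     """Return the index into ``new`` where genuinely-new content begins.
--
--     Same preprocessing as before; the Z-algorithm is replaced by a direct
--     suffix-prefix comparison: try each candidate start (earliest first) and
--     compare ex_proj's suffix with nw_proj's prefix of the same length.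
--     """
--     if not existing or not new:
--         return 0
--
--     tail = existing[-(len(new) * 3):] if len(existing) > len(new) * 3 else existing
--     ex_chars = [c for c in tail if not c.isspace()]
--     nw = [(i, c) for i, c in enumerate(new) if not c.isspace()]
--
--     if not ex_chars or not nw:
--         return 0
--
--     ex_proj = "".join(ex_chars)
--     nw_proj = "".join(c for _, c in nw)
--
--     len_ex = len(ex_proj)
--     min_start = max(0, len_ex - len(nw_proj))
--     for start in range(min_start, len_ex - _MIN_OVERLAP + 1):
--         remaining = len_ex - start
--         if ex_proj[start:] == nw_proj[:remaining]:
--             return nw[remaining - 1][0] + 1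
--     return 0
-- ===== Notes on version B (the rewrite author's own statement) =====
-- stated objective: simpler
-- what changed: Keeps the identical preprocessing but replaces the Z-algorithm (sentinel string, z-array build, window scan) by a direct suffix/prefix slice comparison at each candidate start.
import Mathlib
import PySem

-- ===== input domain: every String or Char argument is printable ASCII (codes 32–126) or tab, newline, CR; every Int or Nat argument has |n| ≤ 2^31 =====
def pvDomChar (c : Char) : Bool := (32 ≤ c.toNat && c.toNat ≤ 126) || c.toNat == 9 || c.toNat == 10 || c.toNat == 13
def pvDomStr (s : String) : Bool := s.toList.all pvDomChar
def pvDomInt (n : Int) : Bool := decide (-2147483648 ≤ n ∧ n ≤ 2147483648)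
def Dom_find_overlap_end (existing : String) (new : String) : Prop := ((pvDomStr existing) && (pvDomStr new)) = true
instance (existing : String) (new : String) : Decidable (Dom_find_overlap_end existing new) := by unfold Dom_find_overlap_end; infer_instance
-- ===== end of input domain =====

-- B keeps A's preprocessing but replaces the Z-algorithm with a direct suffix/prefix
-- slice comparison at each candidate start (objective: simpler).

-- ===== PORT A =====
-- shared preprocessing (these Python lines are identical in Source A and Source B):
-- tail = existing[-(len(new)*3):] if len(existing) > len(new)*3 else existing
def pvTail (ex0 nw0 : List Char) : List Char :=
  if ex0.length > nw0.length * 3 then PySem.List.slice ex0 (some (-(3 * (nw0.length : Int)))) none else ex0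

-- ex_chars = [c for c in tail if not c.isspace()]   (ex_proj = "".join(ex_chars))
def pvExChars (ex0 nw0 : List Char) : List Char :=
  (pvTail ex0 nw0).filter (fun c => !PySem.Chars.isspace c)

-- nw = [(i, c) for i, c in enumerate(new) if not c.isspace()]
def pvNw (nw0 : List Char) : List (Int × Char) :=
  (PySem.List.enumerate nw0 0).filter (fun p => !PySem.Chars.isspace p.2)

-- while i + z[i] < n and s[z[i]] == s[i + z[i]]: z[i] += 1   (all indices are in range on the executed path)
def zExtend (s : List Char) (i k : Nat) : Nat :=
  if h : i + k < s.length ∧ s.getD k ' ' = s.getD (i + k) ' ' then zExtend s i (k + 1) else k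
termination_by s.length - (i + k)
decreasing_by omega

-- the body of _z_array's for-loop (state = (z, l, r))
def zStep (s : List Char) (st : List Nat × Nat × Nat) (i : Nat) : List Nat × Nat × Nat :=
  let z := st.1
  let l := st.2.1
  let r := st.2.2
  let z0 := if i < r then min (r - i) (z.getD (i - l) 0) else 0
  let zi := zExtend s i z0
  let z' := z.set i zi
  if i + zi > r then (z', i, i + zi) else (z', l, r)

-- _z_array(s)
def zArray (s : List Char) : List Nat :=
  let n := s.length
  if n = 0 then List.replicate n 0
  else ((List.range' 1 (n - 1)).foldl (zStep s) ((List.replicate n 0).set 0 n, 0, 0)).1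

-- for start in range(min_start, len_ex - _MIN_OVERLAP + 1): …
def scanA (z : List Nat) (nw : List (Int × Char)) (off len_ex : Nat) : List Nat → Int
  | [] => 0
  | start :: rest =>
    let remaining := len_ex - start
    if remaining ≤ z.getD (off + start) 0 ∧ 8 ≤ remaining then
      (nw.getD (remaining - 1) (0, ' ')).1 + 1
    else scanA z nw off len_ex rest

def find_overlap_end (existing : String) (new : String) : Int :=
  if existing.toList = [] ∨ new.toList = [] then 0 else
  let ex_chars := pvExChars existing.toList new.toList
  let nw := pvNw new.toList
  if ex_chars = [] ∨ nw = [] then 0 else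
  let nw_proj := nw.map (·.2)
  let combined := nw_proj ++ '\x01' :: ex_chars
  let z := zArray combined
  let off := nw_proj.length + 1
  let len_ex := ex_chars.length
  let min_start := len_ex - nw_proj.length
  scanA z nw off len_ex (List.range' min_start (len_ex - 7 - min_start))

-- ===== PORT B =====
-- for start in range(min_start, len_ex - _MIN_OVERLAP + 1):
--   if ex_proj[start:] == nw_proj[:remaining]: return nw[remaining-1][0] + 1
def scanB (ex_proj nw_proj : List Char) (nw : List (Int × Char)) (len_ex : Nat) : List Nat → Int
  | [] => 0
  | start :: rest =>
    let remaining := len_ex - start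
    if ex_proj.drop start = nw_proj.take remaining then
      (nw.getD (remaining - 1) (0, ' ')).1 + 1
    else scanB ex_proj nw_proj nw len_ex rest

def find_overlap_end_alt (existing : String) (new : String) : Int :=
  if existing.toList = [] ∨ new.toList = [] then 0 else
  let ex_chars := pvExChars existing.toList new.toList
  let nw := pvNw new.toList
  if ex_chars = [] ∨ nw = [] then 0 else
  let nw_proj := nw.map (·.2)
  let len_ex := ex_chars.length
  let min_start := len_ex - nw_proj.length
  scanB ex_chars nw_proj nw len_ex (List.range' min_start (len_ex - 7 - min_start))

-- ===== PRECONDITION & SPEC =====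
def Spec_find_overlap_end (existing : String) (new : String) (out : Int) : Prop := out = find_overlap_end_alt existing new
instance (existing : String) (new : String) (out : Int) : Decidable (Spec_find_overlap_end existing new out) := by unfold Spec_find_overlap_end; infer_instance

-- ===== CLAIM (what is proved, stated in full; the proofs are below) =====
def Claim_equal_find_overlap_end : Prop := ∀ (existing : String) (new : String), Dom_find_overlap_end existing new → Spec_find_overlap_end existing new (find_overlap_end existing new)

-- ===== LEMMAS AND PROOFS =====

-- `Matches s i m`: the first m characters of s match the m characters starting at i.
def Matches (s : List Char) (i m : Nat) : Prop :=
  i + m ≤ s.length ∧ ∀ j, j < m → s.getD j ' ' = s.getD (i + j) ' '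

-- `IsLcp s i ℓ`: ℓ is the longest prefix of s matching the substring starting at i.
def IsLcp (s : List Char) (i ℓ : Nat) : Prop :=
  Matches s i ℓ ∧ (i + ℓ = s.length ∨ s.getD ℓ ' ' ≠ s.getD (i + ℓ) ' ')

theorem matches_mono {s : List Char} {i m m' : Nat} (h : Matches s i m) (hm : m' ≤ m) :
    Matches s i m' := ⟨by have := h.1; omega, fun j hj => h.2 j (by omega)⟩

theorem isLcp_ge_iff {s : List Char} {i ℓ m : Nat} (h : IsLcp s i ℓ) :
    m ≤ ℓ ↔ Matches s i m := by
  constructor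
  · exact fun hm => matches_mono h.1 hm
  · intro hm
    by_contra hlt
    have hℓm : ℓ < m := by omega
    have := hm.2 ℓ hℓm
    rcases h.2 with h2 | h2
    · have := hm.1; omega
    · exact h2 this

theorem zExtend_spec (s : List Char) (i : Nat) :
    ∀ k, Matches s i k → k ≤ zExtend s i k ∧ IsLcp s i (zExtend s i k) := by
  intro k
  induction k using zExtend.induct s i with
  | case1 k h ih =>
    intro hk
    rw [zExtend, dif_pos h]
    have hk1 : Matches s i (k + 1) := by
      refine ⟨by have := hk.1; omega, fun j hj => ?_⟩
      rcases Nat.lt_or_ge j k with hj' | hj'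
      · exact hk.2 j hj'
      · have : j = k := by omega
        subst this; exact h.2
    have := ih hk1
    exact ⟨by omega, this.2⟩
  | case2 k h =>
    intro hk
    rw [zExtend, dif_neg h]
    refine ⟨le_refl _, hk, ?_⟩
    rcases not_and_or.mp h with h1 | h1
    · left; have := hk.1; omega
    · right; exact h1

-- the invariant of _z_array's for-loop right before iteration i
def ZInv (s : List Char) (i : Nat) (st : List Nat × Nat × Nat) : Prop :=
  st.1.length = s.length ∧
  (∀ j, j < i → IsLcp s j (st.1.getD j 0)) ∧
  (∀ j, j < s.length → Matches s j (st.1.getD j 0)) ∧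
  st.2.1 ≤ st.2.2 ∧ st.2.2 ≤ s.length ∧ st.2.1 < i ∧
  Matches s st.2.1 (st.2.2 - st.2.1)

theorem getD_set_self {l : List Nat} {i : Nat} {v : Nat} (h : i < l.length) :
    (l.set i v).getD i 0 = v := by
  simp [List.getD_eq_getElem?_getD, h]

theorem getD_set_ne {l : List Nat} {i j : Nat} {v : Nat} (h : i ≠ j) :
    (l.set i v).getD j 0 = l.getD j 0 := by
  simp [List.getD_eq_getElem?_getD, List.getElem?_set_ne h]

theorem zStep_inv {s : List Char} {i : Nat} {st : List Nat × Nat × Nat}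
    (hinv : ZInv s i st) (_hi1 : 1 ≤ i) (hin : i < s.length) :
    ZInv s (i + 1) (zStep s st i) := by
  obtain ⟨hlen, hlcp, hval, hlr, hrn, hli, hwin⟩ := hinv
  obtain ⟨z, l, r⟩ := st
  simp only at hlen hlcp hval hlr hrn hli hwin ⊢
  unfold zStep
  simp only
  set z0 := if i < r then min (r - i) (z.getD (i - l) 0) else 0 with hz0
  have hz0m : Matches s i z0 := by
    rw [hz0]
    split_ifs with hir
    · have hvil := hval (i - l) (by omega)
      refine ⟨by omega, fun j hj => ?_⟩
      have h1 : s.getD j ' ' = s.getD ((i - l) + j) ' ' := hvil.2 j (by omega)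
      have hvil1 := hvil.1
      have h2 : s.getD ((i - l) + j) ' ' = s.getD (l + ((i - l) + j)) ' ' :=
        hwin.2 ((i - l) + j) (by omega)
      have h3 : l + ((i - l) + j) = i + j := by omega
      rw [h1, h2, h3]
    · exact ⟨by omega, fun j hj => absurd hj (Nat.not_lt_zero j)⟩
  obtain ⟨hz0le, hzi⟩ := zExtend_spec s i z0 hz0m
  set zi := zExtend s i z0 with hzidef
  have hziM : Matches s i zi := hzi.1
  have hzin : i + zi ≤ s.length := hziM.1
  have hset : ∀ j, (z.set i zi).getD j 0 = if i = j then zi else z.getD j 0 := by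
    intro j
    split_ifs with hij
    · subst hij; exact getD_set_self (by omega)
    · exact getD_set_ne hij
  have hA : ∀ j, j < i + 1 → IsLcp s j ((z.set i zi).getD j 0) := by
    intro j hj
    rw [hset j]
    split_ifs with hij
    · subst hij; exact hzi
    · exact hlcp j (by omega)
  have hB : ∀ j, j < s.length → Matches s j ((z.set i zi).getD j 0) := by
    intro j hj
    rw [hset j]
    split_ifs with hij
    · subst hij; exact hziM
    · exact hval j hj
  have hlen' : (z.set i zi).length = s.length := by simp [hlen]
  split_ifs with hgt
  · refine ⟨hlen', hA, hB, ?_, ?_, ?_, ?_⟩ <;> dsimp only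
    · omega
    · exact hzin
    · omega
    · have harith : i + zi - i = zi := by omega
      rw [harith]; exact hziM
  · refine ⟨hlen', hA, hB, ?_, ?_, ?_, ?_⟩ <;> dsimp only
    · exact hlr
    · exact hrn
    · omega
    · exact hwin

theorem zFold_inv (s : List Char) :
    ∀ (m i : Nat) (st : List Nat × Nat × Nat), ZInv s i st → 1 ≤ i → i + m ≤ s.length →
      ZInv s (i + m) ((List.range' i m).foldl (zStep s) st) := by
  intro m
  induction m with
  | zero => intro i st h _ _; simpa using h
  | succ m ih =>
    intro i st h hi1 him
    rw [List.range'_succ, List.foldl_cons]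
    have := ih (i + 1) (zStep s st i) (zStep_inv h hi1 (by omega)) (by omega) (by omega)
    have harith : i + 1 + m = i + (m + 1) := by omega
    rwa [harith] at this

theorem zArray_spec (s : List Char) :
    ∀ i, i < s.length → IsLcp s i ((zArray s).getD i 0) := by
  intro i hi
  have hn : s.length ≠ 0 := by omega
  have hinit : ZInv s 1 ((List.replicate s.length 0).set 0 s.length, 0, 0) := by
    have hget : ∀ j : Nat, ((List.replicate s.length 0).set 0 s.length).getD j 0 =
        if 0 = j then s.length else (List.replicate s.length 0).getD j 0 := by
      intro j
      split_ifs with hj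
      · subst hj; exact getD_set_self (by simp; omega)
      · exact getD_set_ne hj
    have hrepl : ∀ j : Nat, (List.replicate s.length 0).getD j 0 = 0 := by
      intro j
      rcases Nat.lt_or_ge j s.length with h | h
      · simp [List.getD_eq_getElem?_getD, h]
      · simp [List.getD_eq_getElem?_getD, h]
    refine ⟨?_, ?_, ?_, ?_, ?_, ?_, ?_⟩ <;> dsimp only
    · simp
    · intro j hj
      have hj0 : j = 0 := by omega
      subst hj0
      rw [hget 0, if_pos rfl]
      exact ⟨⟨by omega, fun k _ => by simp⟩, Or.inl (by omega)⟩
    · intro j hj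
      rw [hget j]
      split_ifs with h0
      · subst h0; exact ⟨by omega, fun k _ => by simp⟩
      · rw [hrepl j]; exact ⟨by omega, fun k hk' => absurd hk' (Nat.not_lt_zero k)⟩
    · omega
    · omega
    · omega
    · exact ⟨by omega, fun j hj => absurd hj (by omega)⟩
  have hfold := zFold_inv s (s.length - 1) 1 _ hinit (le_refl _) (by omega)
  have harith : 1 + (s.length - 1) = s.length := by omega
  rw [harith] at hfold
  have : zArray s = ((List.range' 1 (s.length - 1)).foldl (zStep s)
      ((List.replicate s.length 0).set 0 s.length, 0, 0)).1 := by
    unfold zArray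
    simp [hn]
  rw [this]
  exact hfold.2.1 i hi

-- indexing into combined = nw_proj ++ sep :: ex_proj
theorem getD_combined_left {nwp exp : List Char} {sep : Char} {j : Nat} (hj : j < nwp.length) :
    (nwp ++ sep :: exp).getD j ' ' = nwp.getD j ' ' := by
  simp [List.getD_eq_getElem?_getD, List.getElem?_append_left hj]

theorem getD_combined_right {nwp exp : List Char} {sep : Char} {k : Nat} (_hk : k < exp.length) :
    (nwp ++ sep :: exp).getD (nwp.length + 1 + k) ' ' = exp.getD k ' ' := by
  have h1 : nwp.length ≤ nwp.length + 1 + k := by omega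
  rw [List.getD_eq_getElem?_getD, List.getElem?_append_right h1]
  have h2 : nwp.length + 1 + k - nwp.length = k + 1 := by omega
  rw [h2]
  simp [List.getD_eq_getElem?_getD]

-- the pointwise form of ex_proj[start:] == nw_proj[:remaining]
theorem drop_take_eq_iff {exp nwp : List Char} {start : Nat}
    (hs : start ≤ exp.length) (hr : exp.length - start ≤ nwp.length) :
    (exp.drop start = nwp.take (exp.length - start)) ↔
      (∀ j, j < exp.length - start → exp.getD (start + j) ' ' = nwp.getD j ' ') := by
  set rem := exp.length - start with hrem
  have hlend : (exp.drop start).length = rem := by simp [hrem]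
  have hlent : (nwp.take rem).length = rem := by simp; omega
  constructor
  · intro heq j hj
    have h1 : (exp.drop start).getD j ' ' = (nwp.take rem).getD j ' ' := by rw [heq]
    rw [List.getD_eq_getElem?_getD, List.getD_eq_getElem?_getD] at h1
    rw [List.getElem?_drop] at h1
    rw [List.getElem?_take_of_lt hj] at h1
    rw [List.getD_eq_getElem?_getD, List.getD_eq_getElem?_getD]
    exact h1
  · intro hpt
    apply List.ext_getElem (by rw [hlend, hlent])
    intro j hj1 hj2
    rw [hlend] at hj1
    have hsj : start + j < exp.length := by omega
    have hjn : j < nwp.length := by omega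
    have h1 := hpt j hj1
    rw [List.getD_eq_getElem?_getD, List.getD_eq_getElem?_getD,
      List.getElem?_eq_getElem hsj, List.getElem?_eq_getElem hjn] at h1
    simp only [Option.getD_some] at h1
    simp [List.getElem_drop, List.getElem_take, h1]

-- condition equivalence at one start
theorem cond_iff {exp nwp : List Char} {start : Nat}
    (hms : exp.length - nwp.length ≤ start) (h8 : start + 8 ≤ exp.length) :
    ((exp.length - start ≤ (zArray (nwp ++ '\x01' :: exp)).getD (nwp.length + 1 + start) 0 ∧
        8 ≤ exp.length - start) ↔
      exp.drop start = nwp.take (exp.length - start)) := by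
  set s := nwp ++ '\x01' :: exp with hsdef
  set rem := exp.length - start with hremdef
  have hslen : s.length = nwp.length + 1 + exp.length := by
    simp only [hsdef, List.length_append, List.length_cons]; omega
  have hi : nwp.length + 1 + start < s.length := by omega
  have hlcp := zArray_spec s _ hi
  have hrem8 : 8 ≤ rem := by omega
  have hrnw : rem ≤ nwp.length := by omega
  rw [and_iff_left hrem8, isLcp_ge_iff hlcp]
  have hM : Matches s (nwp.length + 1 + start) rem ↔
      ∀ j, j < rem → exp.getD (start + j) ' ' = nwp.getD j ' ' := by
    unfold Matches
    have htot : nwp.length + 1 + start + rem ≤ s.length := by omega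
    rw [and_iff_right htot]
    constructor
    · intro h j hj
      have := h j hj
      rw [getD_combined_left (by omega)] at this
      have harith : nwp.length + 1 + start + j = nwp.length + 1 + (start + j) := by omega
      rw [harith, getD_combined_right (by omega)] at this
      exact this.symm
    · intro h j hj
      rw [getD_combined_left (by omega)]
      have harith : nwp.length + 1 + start + j = nwp.length + 1 + (start + j) := by omega
      rw [harith, getD_combined_right (by omega)]
      exact (h j hj).symm
  rw [hM, drop_take_eq_iff (by omega) (by omega)]

-- the two scan loops agree on any list of in-range starts
theorem scan_eq (exp nwp : List Char) (nw : List (Int × Char)) :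
    ∀ starts : List Nat,
      (∀ st ∈ starts, exp.length - nwp.length ≤ st ∧ st + 8 ≤ exp.length) →
      scanA (zArray (nwp ++ '\x01' :: exp)) nw (nwp.length + 1) exp.length starts =
        scanB exp nwp nw exp.length starts := by
  intro starts
  induction starts with
  | nil => intro _; rfl
  | cons start rest ih =>
    intro hmem
    have hst := hmem start (List.mem_cons_self)
    unfold scanA scanB
    simp only
    rw [if_congr (cond_iff hst.1 hst.2) rfl (ih (fun st hst' => hmem st (List.mem_cons_of_mem _ hst')))]

-- ===== VERDICT (by name: the statement is the Claim_ definition above) =====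
theorem find_overlap_end_spec : Claim_equal_find_overlap_end := by
  intro existing new _
  unfold Spec_find_overlap_end find_overlap_end find_overlap_end_alt
  dsimp only
  split_ifs with h1 h2
  · rfl
  · rfl
  · apply scan_eq
    intro st hst
    rw [List.mem_range'_1] at hst
    omega
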